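-- pv_equiv track=rewrite | github.com/fergusmeiklejohn/neural_networks_research | experiments/04_distribution_invention_mechanisms/evaluate_enhanced_system.py | _analyze_hypotheses
-- ===== SOURCE A (Python) =====
-- from typing import Dict, List
--
-- def _analyze_hypotheses(results: List[Dict]) -> Dict:
--     """Analyze successful hypotheses."""
--     hypothesis_success = {}
--
--     for r in results:
--         if r["success_enhanced"] and r.get("best_hypothesis"):
--             hyp = r["best_hypothesis"]
--             if hyp not in hypothesis_success:
--                 hypothesis_success[hyp] = {"success": 0, "total": 0}
--             hypothesis_success[hyp]["success"] += 1
--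
--         if r.get("best_hypothesis"):
--             hyp = r["best_hypothesis"]
--             if hyp not in hypothesis_success:
--                 hypothesis_success[hyp] = {"success": 0, "total": 0}
--             hypothesis_success[hyp]["total"] += 1
--
--     return hypothesis_success
-- ===== SOURCE B (Python) =====
-- from typing import Dict, List
--
--
-- def _analyze_hypotheses(results: List[Dict]) -> Dict:
--     """Group-then-count: project each result to a (hypothesis, success?) pair,
--     keep the truthy-hypothesis rows, take the hypotheses in first-appearance
--     order, and recount each group per key."""
--     pairs = [(r.get("best_hypothesis"), bool(r["success_enhanced"])) for r in results]
--     rows = [(h, s) for h, s in pairs if h]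
--     out = {}
--     for hyp in dict.fromkeys(h for h, _ in rows):
--         out[hyp] = {
--             "success": sum(1 for h, s in rows if h == hyp and s),
--             "total": sum(1 for h, _ in rows if h == hyp),
--         }
--     return out
-- ===== Notes on version B (the rewrite author's own statement) =====
-- stated objective: alternative
-- what changed: Replaces A's single pass that mutates nested per-hypothesis counter dicts in place with a group-then-count scheme: one projection pass to (hypothesis, success) rows, an ordered dedup of the keys, then a per-key recount of each group by nested scans.
import Mathlib
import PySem

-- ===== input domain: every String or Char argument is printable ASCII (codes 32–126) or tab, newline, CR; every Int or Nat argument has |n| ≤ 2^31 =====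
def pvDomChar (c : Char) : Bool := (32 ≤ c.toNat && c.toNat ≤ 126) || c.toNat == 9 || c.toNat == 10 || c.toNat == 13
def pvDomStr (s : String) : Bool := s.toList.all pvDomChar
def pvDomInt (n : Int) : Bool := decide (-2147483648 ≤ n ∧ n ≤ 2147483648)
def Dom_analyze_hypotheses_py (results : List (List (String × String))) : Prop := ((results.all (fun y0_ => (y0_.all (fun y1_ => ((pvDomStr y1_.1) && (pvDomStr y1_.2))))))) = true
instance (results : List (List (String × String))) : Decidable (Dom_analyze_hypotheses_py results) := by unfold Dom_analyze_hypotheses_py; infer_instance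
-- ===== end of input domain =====

-- B replaces A's single pass that mutates nested per-hypothesis dicts in place by a group-then-count
-- scheme: project to (hypothesis, success) rows, dedupe the keys in first-appearance order, recount
-- each group per key (objective: alternative). Equivalence is about the return value.

-- ===== PORT A =====
-- r["success_enhanced"]: first-match lookup; Pre_ guarantees the key is present (Python raises KeyError otherwise);
-- "" is returned only for a present-but-empty value, which is falsy exactly like Python's.
def pySE (r : List (String × String)) : String := (PySem.Dict.mk r).getD "success_enhanced" ""
-- r.get("best_hypothesis"): missing key → None (falsy), modelled as "" which is equally falsy; the value is
-- only ever used under the truthiness guard, where it is the present non-empty string.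
def pyBH (r : List (String × String)) : String := ((PySem.Dict.mk r).get? "best_hypothesis").getD ""

-- the shared body of A's two branches: insert {"success":0,"total":0} if hyp unseen, then bump the field
def bumpA (hs : PySem.Dict String (PySem.Dict String Int)) (hyp fld : String) :
    PySem.Dict String (PySem.Dict String Int) :=
  let hs' := if hs.contains hyp then hs
             else hs.insert hyp (PySem.Dict.mk [("success", 0), ("total", 0)])
  hs'.modify hyp (PySem.Dict.mk []) (fun inner => inner.modify fld 0 (· + 1))

def stepA (hs : PySem.Dict String (PySem.Dict String Int)) (r : List (String × String)) :
    PySem.Dict String (PySem.Dict String Int) :=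
  let se := pySE r
  let bh := pyBH r
  let hs1 := if se ≠ "" ∧ bh ≠ "" then bumpA hs bh "success" else hs
  if bh ≠ "" then bumpA hs1 bh "total" else hs1

def analyze_hypotheses_py (results : List (List (String × String))) : List (String × List (String × Int)) :=
  (results.foldl stepA PySem.Dict.empty).items.map (fun p => (p.1, p.2.items))

-- ===== PORT B =====
-- pairs = [(r.get("best_hypothesis"), bool(r["success_enhanced"])) for r in results]; rows keeps truthy hypotheses
def rowsB (results : List (List (String × String))) : List (String × Bool) :=
  ((results.map (fun r => (pyBH r, decide (pySE r ≠ "")))).filter (fun p => decide (p.1 ≠ "")))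

-- dict.fromkeys ordered dedup = PySem.List.dedup; each 0/1-sum generator is List.countP
def analyze_hypotheses_py_alt (results : List (List (String × String))) : List (String × List (String × Int)) :=
  (PySem.List.dedup ((rowsB results).map Prod.fst)).map (fun hyp =>
    (hyp, [("success", ((rowsB results).countP (fun p => p.1 == hyp && p.2) : Int)),
           ("total", ((rowsB results).countP (fun p => p.1 == hyp) : Int))]))

-- ===== PRECONDITION & SPEC =====
-- Pre_ excludes exactly the inputs where some result lacks the key "success_enhanced": there Python A
-- raises KeyError.
def Pre_analyze_hypotheses_py (results : List (List (String × String))) : Prop :=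
  ∀ r ∈ results, (PySem.Dict.mk r).contains "success_enhanced" = true
instance (results : List (List (String × String))) : Decidable (Pre_analyze_hypotheses_py results) := by unfold Pre_analyze_hypotheses_py; infer_instance

def pvWitness_analyze_hypotheses_py : (List (List (String × String))) :=
  [[("success_enhanced", "y"), ("best_hypothesis", "h1")], [("success_enhanced", ""), ("best_hypothesis", "h1")]]

def Spec_analyze_hypotheses_py (results : List (List (String × String))) (out : List (String × List (String × Int))) : Prop := out = analyze_hypotheses_py_alt results
instance (results : List (List (String × String))) (out : List (String × List (String × Int))) : Decidable (Spec_analyze_hypotheses_py results out) := by unfold Spec_analyze_hypotheses_py; infer_instance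

-- ===== CLAIM (what is proved, stated in full; the proofs are below) =====
def Claim_equal_analyze_hypotheses_py : Prop := ∀ (results : List (List (String × String))), Dom_analyze_hypotheses_py results → Pre_analyze_hypotheses_py results → Spec_analyze_hypotheses_py results (analyze_hypotheses_py results)

-- ===== LEMMAS AND PROOFS =====

def pFiltB (r : List (String × String)) : Bool := decide (pySE r ≠ "") && decide (pyBH r ≠ "")
def qFiltB (r : List (String × String)) : Bool := decide (pyBH r ≠ "")

-- A's accumulator rendered as the joined view of the two per-key tallies
def renderHS (S T : PySem.Dict String Int) : PySem.Dict String (PySem.Dict String Int) :=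
  PySem.Dict.mk (T.items.map (fun p => (p.1, PySem.Dict.mk [("success", S.getD p.1 0), ("total", p.2)])))

lemma renderHS_contains (S T : PySem.Dict String Int) (k : String) :
    (renderHS S T).contains k = T.contains k := by
  simp only [renderHS, PySem.Dict.contains, List.any_map]
  rfl

lemma renderHS_get? (S T : PySem.Dict String Int) (k : String) :
    (renderHS S T).get? k = (T.get? k).map (fun t => PySem.Dict.mk [("success", S.getD k 0), ("total", t)]) := by
  obtain ⟨l⟩ := T
  induction l with
  | nil => rfl
  | cons a l ih =>
    by_cases h : a.1 = k
    · simp [renderHS, PySem.Dict.get?, PySem.Dict.getD, h]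
    · have hb : (a.1 == k) = false := by simpa using h
      simp only [renderHS, PySem.Dict.get?, PySem.Dict.getD, List.map_cons, List.find?_cons, hb]
      simpa [renderHS, PySem.Dict.get?, PySem.Dict.getD] using ih

-- bump "total" on the joined view, key already present
lemma bumpA_total_contains (S T : PySem.Dict String Int) (bh : String)
    (hc : T.contains bh = true) :
    bumpA (renderHS S T) bh "total" = renderHS S (T.modify bh 0 (· + 1)) := by
  obtain ⟨t0, ht⟩ : ∃ t0, T.get? bh = some t0 := by
    have h1 := PySem.Dict.contains_eq_isSome_get? T bh
    rw [hc] at h1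
    exact Option.isSome_iff_exists.mp h1.symm
  have hgetD : T.getD bh 0 = t0 := by simp [PySem.Dict.getD, ht]
  have hrc : (renderHS S T).contains bh = true := by rw [renderHS_contains]; exact hc
  have hrg : (renderHS S T).getD bh (PySem.Dict.mk []) =
      PySem.Dict.mk [("success", S.getD bh 0), ("total", t0)] := by
    simp [PySem.Dict.getD, renderHS_get?, ht]
  simp only [bumpA, hrc, if_true, PySem.Dict.modify, hrg, hgetD]
  apply PySem.Dict.ext
  rw [PySem.Dict.items_insert_of_contains _ _ hrc]
  show _ = (PySem.Dict.mk ((T.insert bh (t0 + 1)).items.map _)).items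
  rw [PySem.Dict.items_insert_of_contains _ _ hc]
  show ((T.items.map _).map _) = ((T.items.map _).map _)
  rw [List.map_map, List.map_map]
  apply List.map_congr_left
  intro p _
  by_cases hpk : p.1 = bh
  · simp [Function.comp, hpk]
    rfl
  · simp [Function.comp, hpk]

-- bump "success" on the joined view, key already present
lemma bumpA_success_contains (S T : PySem.Dict String Int) (bh : String)
    (hnd : T.keys.Nodup) (hc : T.contains bh = true) :
    bumpA (renderHS S T) bh "success" = renderHS (S.modify bh 0 (· + 1)) T := by
  obtain ⟨t0, ht⟩ : ∃ t0, T.get? bh = some t0 := by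
    have h1 := PySem.Dict.contains_eq_isSome_get? T bh
    rw [hc] at h1
    exact Option.isSome_iff_exists.mp h1.symm
  have hrc : (renderHS S T).contains bh = true := by rw [renderHS_contains]; exact hc
  have hrg : (renderHS S T).getD bh (PySem.Dict.mk []) =
      PySem.Dict.mk [("success", S.getD bh 0), ("total", t0)] := by
    simp [PySem.Dict.getD, renderHS_get?, ht]
  simp only [bumpA, hrc, if_true, PySem.Dict.modify, hrg]
  apply PySem.Dict.ext
  rw [PySem.Dict.items_insert_of_contains _ _ hrc]
  show (T.items.map _).map _ = T.items.map _
  rw [List.map_map]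
  apply List.map_congr_left
  intro p hp
  by_cases hpk : p.1 = bh
  · have hmem : (bh, p.2) ∈ T.items := by rw [← hpk]; simpa using hp
    have hp2 : p.2 = t0 := by
      have := (PySem.Dict.get?_eq_some_iff_mem_items T bh p.2 hnd).mpr hmem
      rw [ht] at this
      exact (Option.some.injEq _ _).mp this.symm
    simp [Function.comp, hpk, hp2]
    rfl
  · simp [Function.comp, hpk, PySem.Dict.getD_insert_of_ne _ _ _ hpk]

-- bump "total" on the joined view, fresh key
lemma bumpA_total_fresh (S T : PySem.Dict String Int) (bh : String)
    (hc : T.contains bh = false) (hS : S.getD bh 0 = 0) :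
    bumpA (renderHS S T) bh "total" = renderHS S (T.modify bh 0 (· + 1)) := by
  have hrc : (renderHS S T).contains bh = false := by rw [renderHS_contains]; exact hc
  have hz : (PySem.Dict.mk [("success", (0:Int)), ("total", (0:Int))]).insert "total"
      ((PySem.Dict.mk [("success", (0:Int)), ("total", (0:Int))]).getD "total" 0 + 1) =
      PySem.Dict.mk [("success", 0), ("total", 1)] := by rfl
  simp only [bumpA, hrc, Bool.false_eq_true, if_false, PySem.Dict.modify,
    PySem.Dict.getD_insert_self, hz, PySem.Dict.insert_insert_self,
    PySem.Dict.getD_of_not_contains T _ hc]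
  apply PySem.Dict.ext
  rw [PySem.Dict.items_insert_of_not_contains _ _ hrc]
  show _ = (PySem.Dict.mk ((T.insert bh (0 + 1)).items.map _)).items
  rw [PySem.Dict.items_insert_of_not_contains _ _ hc, List.map_append]
  simp [renderHS, hS]

-- bump "success" on the joined view, fresh key: A records it with total 0
lemma bumpA_success_fresh (S T : PySem.Dict String Int) (bh : String)
    (hc : T.contains bh = false) (hS : S.getD bh 0 = 0) :
    bumpA (renderHS S T) bh "success" = renderHS (S.modify bh 0 (· + 1)) (T.insert bh 0) := by
  have hrc : (renderHS S T).contains bh = false := by rw [renderHS_contains]; exact hc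
  have hz : (PySem.Dict.mk [("success", (0:Int)), ("total", (0:Int))]).insert "success"
      ((PySem.Dict.mk [("success", (0:Int)), ("total", (0:Int))]).getD "success" 0 + 1) =
      PySem.Dict.mk [("success", 1), ("total", 0)] := by rfl
  have hne : ∀ p ∈ T.items, p.1 ≠ bh := by
    intro p hp h
    have h2 : T.contains bh = true := by
      simp only [PySem.Dict.contains, List.any_eq_true]
      exact ⟨p, hp, by simp [h]⟩
    rw [h2] at hc
    cases hc
  simp only [bumpA, hrc, Bool.false_eq_true, if_false, PySem.Dict.modify,
    PySem.Dict.getD_insert_self, hz, PySem.Dict.insert_insert_self]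
  apply PySem.Dict.ext
  rw [PySem.Dict.items_insert_of_not_contains _ _ hrc]
  show _ = (PySem.Dict.mk ((T.insert bh 0).items.map _)).items
  rw [PySem.Dict.items_insert_of_not_contains _ _ hc, List.map_append]
  simp only [renderHS, List.map_cons, List.map_nil]
  congr 1
  · apply List.map_congr_left
    intro p hp
    rw [PySem.Dict.getD_insert_of_ne _ _ _ (hne p hp)]
  · simp [PySem.Dict.getD_insert_self, hS]

lemma stepA_renderHS (S T : PySem.Dict String Int) (r : List (String × String))
    (hnd : T.keys.Nodup) (hST : ∀ k, T.contains k = false → S.getD k 0 = 0) :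
    stepA (renderHS S T) r =
      renderHS (if pFiltB r then S.modify (pyBH r) 0 (· + 1) else S)
               (if qFiltB r then T.modify (pyBH r) 0 (· + 1) else T) := by
  unfold stepA pFiltB qFiltB
  by_cases hbh : pyBH r ≠ ""
  · rw [if_pos hbh, if_pos (by simp [hbh] : (decide (pyBH r ≠ "")) = true)]
    by_cases hse : pySE r ≠ ""
    · rw [if_pos ⟨hse, hbh⟩,
        if_pos (by simp [hse, hbh] : (decide (pySE r ≠ "") && decide (pyBH r ≠ "")) = true)]
      by_cases hc : T.contains (pyBH r) = true
      · rw [bumpA_success_contains S T _ hnd hc, bumpA_total_contains _ T _ hc]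
      · have hc' : T.contains (pyBH r) = false := by simpa using hc
        rw [bumpA_success_fresh S T _ hc' (hST _ hc'),
          bumpA_total_contains _ _ _ (PySem.Dict.contains_insert_self T _ 0)]
        congr 1
        simp only [PySem.Dict.modify, PySem.Dict.getD_insert_self,
          PySem.Dict.insert_insert_self, PySem.Dict.getD_of_not_contains T _ hc']
    · rw [if_neg (by tauto),
        if_neg (by simp [hse] : ¬((decide (pySE r ≠ "") && decide (pyBH r ≠ "")) = true))]
      by_cases hc : T.contains (pyBH r) = true
      · exact bumpA_total_contains S T _ hc
      · have hc' : T.contains (pyBH r) = false := by simpa using hc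
        exact bumpA_total_fresh S T _ hc' (hST _ hc')
  · rw [if_neg hbh, if_neg (by tauto),
      if_neg (by simp [not_not.mp hbh] : ¬((decide (pySE r ≠ "") && decide (pyBH r ≠ "")) = true)),
      if_neg (by simp [not_not.mp hbh] : ¬((decide (pyBH r ≠ "")) = true))]

lemma foldA_eq (l : List (List (String × String))) :
    l.foldl stepA PySem.Dict.empty =
      renderHS (PySem.Dict.counter ((l.filter pFiltB).map pyBH))
               (PySem.Dict.counter ((l.filter qFiltB).map pyBH)) := by
  induction l using List.reverseRecOn with
  | nil => rfl
  | append_singleton l x ih =>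
    rw [List.foldl_append, List.foldl_cons, List.foldl_nil, ih,
      stepA_renderHS _ _ _ (PySem.Dict.nodup_keys_counter _)
        (fun k hk => by
          rw [PySem.Dict.getD_counter]
          rw [PySem.Dict.contains_counter] at hk
          have hkq : k ∉ (l.filter qFiltB).map pyBH := by
            simpa using hk
          have hkp : k ∉ (l.filter pFiltB).map pyBH := by
            intro hmem
            apply hkq
            simp only [List.mem_map, List.mem_filter] at hmem ⊢
            obtain ⟨r, ⟨hr, hpr⟩, hbr⟩ := hmem
            exact ⟨r, ⟨hr, by simp only [pFiltB, Bool.and_eq_true] at hpr; exact hpr.2⟩, hbr⟩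
          simp [List.count_eq_zero.mpr hkp])]
    by_cases hp : pFiltB x = true
    · have hq : qFiltB x = true := by
        simp only [pFiltB, Bool.and_eq_true] at hp
        exact hp.2
      simp [List.filter_append, hp, hq, PySem.Dict.counter_append_singleton]
    · by_cases hq : qFiltB x = true
      · simp [List.filter_append, hp, hq, PySem.Dict.counter_append_singleton]
      · simp [List.filter_append, hp, hq]

-- B's per-key recounts are exactly the two counters' tallies
lemma rows_fst (l : List (List (String × String))) :
    (rowsB l).map Prod.fst = (l.filter qFiltB).map pyBH := by
  simp only [rowsB, List.filter_map, List.map_map]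
  rfl

lemma rows_total_count (l : List (List (String × String))) (k : String) :
    (rowsB l).countP (fun p => p.1 == k) = ((l.filter qFiltB).map pyBH).count k := by
  simp only [rowsB, List.filter_map, List.count, List.countP_map]
  rfl

lemma rows_success_count (l : List (List (String × String))) (k : String) :
    (rowsB l).countP (fun p => p.1 == k && p.2) = ((l.filter pFiltB).map pyBH).count k := by
  simp only [rowsB, List.filter_map, List.count, List.countP_map, List.countP_filter,
    Function.comp_def]
  apply List.countP_congr
  intro r _
  simp only [pFiltB]
  by_cases h1 : pyBH r = k <;> by_cases h2 : pySE r = "" <;> by_cases h3 : pyBH r = "" <;>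
    simp [h1, h2, h3]

-- ===== VERDICT (by name: the statement is the Claim_ definition above) =====
theorem analyze_hypotheses_py_spec : Claim_equal_analyze_hypotheses_py := by
  intro results _ _
  unfold Spec_analyze_hypotheses_py analyze_hypotheses_py analyze_hypotheses_py_alt
  rw [foldA_eq, rows_fst]
  simp only [renderHS, PySem.Dict.items_counter, PySem.List.dedup_eq_ofList, List.map_map]
  apply List.map_congr_left
  intro k hk
  simp [Function.comp, PySem.Dict.getD_counter, rows_total_count, rows_success_count]
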